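-- pv_equiv track=rewrite | github.com/syurskyi/Algorithms_and_Data_Structure | _algorithms_challenges/w3resource/Practice_python-master/python_basics.py | only_even
-- ===== SOURCE A (Python) =====
-- def only_even(numbers):
--     """ 28: returns all numbers in a list if number is even
--     and before 237 in the list.
--     """
--     new_numbers = []
--     for num in numbers:
--         if num == 237:
--             break
--         elif num % 2 == 0:
--             new_numbers.append(num)
--         else:
--             continue
--     return new_numbers
-- ===== SOURCE B (Python) =====
-- def only_even(numbers):
--     cutoff = numbers.index(237) if 237 in numbers else len(numbers)
--     return [n for n in numbers[:cutoff] if n % 2 == 0]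
-- ===== Notes on version B (the rewrite author's own statement) =====
-- stated objective: idiomatic
-- what changed: Replaces the fused loop-with-break by a two-phase form: first compute the cutoff index of 237 (or the length), then slice and filter the prefix with a comprehension.
import Mathlib
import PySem

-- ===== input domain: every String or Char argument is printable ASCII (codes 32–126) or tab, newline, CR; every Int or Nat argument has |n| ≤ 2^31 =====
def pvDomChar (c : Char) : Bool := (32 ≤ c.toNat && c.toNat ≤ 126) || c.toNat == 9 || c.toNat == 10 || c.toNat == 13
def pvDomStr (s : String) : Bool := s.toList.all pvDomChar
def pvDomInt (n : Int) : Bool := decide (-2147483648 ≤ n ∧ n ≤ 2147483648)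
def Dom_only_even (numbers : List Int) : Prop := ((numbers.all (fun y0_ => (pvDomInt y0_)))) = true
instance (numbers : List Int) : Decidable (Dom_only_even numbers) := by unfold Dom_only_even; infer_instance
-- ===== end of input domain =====

-- B replaces A's fused loop-with-break by a two-phase decomposition: find the cutoff
-- index of 237 (or the length), slice that prefix, then filter the even numbers.

-- ===== PORT A =====
-- loop over `numbers` carrying `new_numbers`; `break` returns the accumulator so far
def only_even_loop (acc : List Int) : List Int → List Int
  | [] => acc
  | num :: rest =>
    if num == 237 then acc
    else if PySem.Int.mod num 2 == 0 then only_even_loop (acc ++ [num]) rest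
    else only_even_loop acc rest

def only_even (numbers : List Int) : List Int := only_even_loop [] numbers

-- ===== PORT B =====
def only_even_alt (numbers : List Int) : List Int :=
  let cutoff : Int :=
    match PySem.List.index? numbers (237 : Int) with
    | some i => (i : Int)
    | none => (numbers.length : Int)
  (PySem.List.slice numbers none (some cutoff)).filter (fun n => PySem.Int.mod n 2 == 0)

-- ===== PRECONDITION & SPEC =====
def Spec_only_even (numbers : List Int) (out : List Int) : Prop := out = only_even_alt numbers
instance (numbers : List Int) (out : List Int) : Decidable (Spec_only_even numbers out) := by unfold Spec_only_even; infer_instance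

-- ===== CLAIM (what is proved, stated in full; the proofs are below) =====
def Claim_equal_only_even : Prop := ∀ (numbers : List Int), Dom_only_even numbers → Spec_only_even numbers (only_even numbers)

-- ===== LEMMAS AND PROOFS =====

theorem only_even_loop_acc (l : List Int) : ∀ acc : List Int,
    only_even_loop acc l = acc ++ only_even_loop [] l := by
  induction l with
  | nil => intro acc; simp [only_even_loop]
  | cons x xs ih =>
    intro acc
    simp only [only_even_loop]
    by_cases hx : x = 237
    · simp [hx]
    · simp only [show (x == 237) = false by simp [hx], Bool.false_eq_true, if_false]
      by_cases he : PySem.Int.mod x 2 = 0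
      · simp only [show (PySem.Int.mod x 2 == 0) = true by
            simp only [beq_iff_eq]; exact he, if_true]
        rw [ih (acc ++ [x]), ih ([] ++ [x])]
        simp
      · simp only [show (PySem.Int.mod x 2 == 0) = false by
            simp only [beq_eq_false_iff_ne, ne_eq]; exact he,
          Bool.false_eq_true, if_false]
        exact ih acc

theorem only_even_alt_eq (l : List Int) :
    only_even_alt l
      = (l.takeWhile (fun n => !(n == 237))).filter (fun n => PySem.Int.mod n 2 == 0) := by
  induction l with
  | nil => decide
  | cons x xs ih =>
    by_cases hx : x = 237
    · subst hx
      simp only [only_even_alt, PySem.List.index?_cons_self]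
      rw [PySem.List.slice_to _ (by norm_num)]
      simp
    · simp only [only_even_alt, PySem.List.index?_cons_of_ne xs hx] at ih ⊢
      cases h : PySem.List.index? xs (237 : Int) with
      | none =>
        simp only [h, Option.map_none] at ih ⊢
        rw [PySem.List.slice_to_natCast] at ih ⊢
        simp only [List.take_length] at ih ⊢
        simp only [List.takeWhile_cons, show (!(x == 237)) = true by simp [hx], if_true,
          List.filter_cons]
        rw [ih]
      | some k =>
        simp only [h, Option.map_some] at ih ⊢
        rw [PySem.List.slice_to_natCast] at ih ⊢
        simp only [List.take_succ_cons] at ih ⊢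
        simp only [List.takeWhile_cons, show (!(x == 237)) = true by simp [hx], if_true,
          List.filter_cons]
        rw [ih]

theorem only_even_eq (l : List Int) :
    only_even l
      = (l.takeWhile (fun n => !(n == 237))).filter (fun n => PySem.Int.mod n 2 == 0) := by
  unfold only_even
  induction l with
  | nil => simp [only_even_loop]
  | cons x xs ih =>
    simp only [only_even_loop]
    by_cases hx : x = 237
    · simp [hx]
    · simp only [show (x == 237) = false by simp [hx], Bool.false_eq_true, if_false]
      simp only [List.takeWhile_cons, show (!(x == 237)) = true by simp [hx], if_true]
      by_cases he : PySem.Int.mod x 2 = 0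
      · simp only [show (PySem.Int.mod x 2 == 0) = true by
            simp only [beq_iff_eq]; exact he, if_true]
        rw [only_even_loop_acc, ih, List.filter_cons,
          if_pos (by simp only [beq_iff_eq]; exact he)]
        rfl
      · simp only [show (PySem.Int.mod x 2 == 0) = false by
            simp only [beq_eq_false_iff_ne, ne_eq]; exact he,
          Bool.false_eq_true, if_false]
        rw [ih, List.filter_cons,
          if_neg (by simp only [beq_iff_eq]; exact he)]

-- ===== VERDICT (by name: the statement is the Claim_ definition above) =====
theorem only_even_spec : Claim_equal_only_even := by
  intro numbers _
  unfold Spec_only_even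
  rw [only_even_eq, only_even_alt_eq]
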